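-- pv_equiv track=rewrite | github.com/TechEnthusiast1TechEnthusiast/PathToDSA | practice/generatebinary.py | genb
-- ===== SOURCE A (Python) =====
-- def genb(n,s,c,l):
--     if n==0:
--         return '0'*(l-c)+s
--     else:
--         if n%2==0:
--             s+="0"
--         else:
--             s+="1"
--         c+=1
--     return genb(n//2,s,c,l)
-- ===== SOURCE B (Python) =====
-- def genb(n, s, c, l):
--     b = bin(n)[2:][::-1] if n else ''
--     return '0' * (l - c - len(b)) + s + b
-- ===== Notes on version B (the rewrite author's own statement) =====
-- stated objective: idiomatic
-- what changed: Replaces the four-parameter tail recursion that threads the accumulator s and bit-count c with a closed computation: the reversed binary string bin(n)[2:][::-1], then one padding expression '0'*(l-c-len(b))+s+b.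
import Mathlib
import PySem

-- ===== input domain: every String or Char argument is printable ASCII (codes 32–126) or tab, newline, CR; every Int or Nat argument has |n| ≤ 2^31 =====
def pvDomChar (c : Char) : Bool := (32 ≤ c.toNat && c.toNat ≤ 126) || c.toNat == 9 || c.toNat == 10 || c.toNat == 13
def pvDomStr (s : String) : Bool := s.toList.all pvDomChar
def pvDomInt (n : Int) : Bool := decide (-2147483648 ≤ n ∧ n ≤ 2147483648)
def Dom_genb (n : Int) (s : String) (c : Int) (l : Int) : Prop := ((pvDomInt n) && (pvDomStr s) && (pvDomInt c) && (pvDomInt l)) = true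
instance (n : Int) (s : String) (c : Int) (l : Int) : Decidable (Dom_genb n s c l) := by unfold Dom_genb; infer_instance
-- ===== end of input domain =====

-- B replaces A's four-parameter recursion by a closed computation: the reversed binary
-- string of n (Python's bin(n)[2:][::-1]) padded in one step — objective: simpler/idiomatic.


-- ===== PORT A =====
def genb (n : Int) (s : String) (c : Int) (l : Int) : String :=
  if n = 0 then String.ofList (List.replicate (l - c).toNat '0') ++ s
  else if n < 0 then s  -- totality guard only: for n < 0 the Python recursion never reaches a base case (RecursionError); outside Pre_genb
  else
    let s' := if PySem.Int.mod n 2 = 0 then s ++ "0" else s ++ "1"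
    let c' := c + 1
    genb (PySem.Int.floordiv n 2) s' c' l
termination_by n.toNat
decreasing_by
  rw [PySem.Int.floordiv_eq_ediv_of_pos (by omega)]
  omega

-- ===== PORT B =====
-- exact rendering of Python's bin(m)[2:][::-1] for m ≥ 1 (and of '' for m = 0): bits, least significant first
def revbinChars (m : Nat) : List Char :=
  if m = 0 then [] else (if m % 2 = 0 then '0' else '1') :: revbinChars (m / 2)

def genb_alt (n : Int) (s : String) (c : Int) (l : Int) : String :=
  let b : String := if n = 0 then "" else String.ofList (revbinChars n.toNat)
  String.ofList (List.replicate (l - c - (b.length : Int)).toNat '0') ++ s ++ b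

-- ===== PRECONDITION & SPEC =====
-- Pre_ excludes exactly n < 0, where the Python A recurses forever on n//2 and raises RecursionError.
def Pre_genb (n : Int) (s : String) (c : Int) (l : Int) : Prop := 0 ≤ n
instance (n : Int) (s : String) (c : Int) (l : Int) : Decidable (Pre_genb n s c l) := by unfold Pre_genb; infer_instance
def pvWitness_genb : Int × String × Int × Int := (6, "x", 1, 8)

def Spec_genb (n : Int) (s : String) (c : Int) (l : Int) (out : String) : Prop := out = genb_alt n s c l
instance (n : Int) (s : String) (c : Int) (l : Int) (out : String) : Decidable (Spec_genb n s c l out) := by unfold Spec_genb; infer_instance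

-- ===== CLAIM (what is proved, stated in full; the proofs are below) =====
def Claim_equal_genb : Prop := ∀ (n : Int) (s : String) (c : Int) (l : Int), Dom_genb n s c l → Pre_genb n s c l → Spec_genb n s c l (genb n s c l)

-- ===== LEMMAS AND PROOFS =====

lemma ofList_revbin_zero : String.ofList (revbinChars 0) = "" := by
  rw [revbinChars]; simp

lemma alt_step (m : Nat) (hm : m ≠ 0) (s : String) (c l : Int) :
    genb_alt ((m / 2 : Nat) : Int) (s ++ (if (m % 2 : Nat) = 0 then "0" else "1")) (c + 1) l
      = genb_alt (m : Int) s c l := by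
  have hb' : (if ((m / 2 : Nat) : Int) = 0 then ("" : String) else String.ofList (revbinChars (m / 2)))
      = String.ofList (revbinChars (m / 2)) := by
    by_cases h : m / 2 = 0
    · rw [if_pos (by exact_mod_cast h), h, ofList_revbin_zero]
    · rw [if_neg (by exact_mod_cast h)]
  unfold genb_alt
  simp only [Int.toNat_natCast]
  rw [hb']
  have hrec : revbinChars m = (if m % 2 = 0 then '0' else '1') :: revbinChars (m / 2) := by
    rw [revbinChars]; simp [hm]
  have hm0 : ¬ ((m : Int) = 0) := by exact_mod_cast hm
  simp only [if_neg hm0, hrec]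
  have hlen : ((String.ofList ((if m % 2 = 0 then '0' else '1') :: revbinChars (m / 2))).length : Int)
      = ((String.ofList (revbinChars (m / 2))).length : Int) + 1 := by
    simp
  have hpad : (l - c - ((String.ofList ((if m % 2 = 0 then '0' else '1') :: revbinChars (m / 2))).length : Int))
      = (l - (c + 1) - ((String.ofList (revbinChars (m / 2))).length : Int)) := by
    rw [hlen]; ring
  rw [hpad]
  have hbit : (s ++ (if (m % 2 : Nat) = 0 then ("0" : String) else "1")) ++ String.ofList (revbinChars (m / 2))
      = s ++ String.ofList ((if m % 2 = 0 then '0' else '1') :: revbinChars (m / 2)) := by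
    by_cases hp : m % 2 = 0
    · rw [if_pos hp, if_pos hp, String.append_assoc]
      congr 1
      rw [show ('0' :: revbinChars (m / 2)) = ['0'] ++ revbinChars (m / 2) from rfl, String.ofList_append]
    · rw [if_neg hp, if_neg hp, String.append_assoc]
      congr 1
      rw [show ('1' :: revbinChars (m / 2)) = ['1'] ++ revbinChars (m / 2) from rfl, String.ofList_append]
  rw [String.append_assoc, hbit, ← String.append_assoc]

lemma genb_eq_alt (m : Nat) : ∀ (s : String) (c l : Int), genb (m : Int) s c l = genb_alt (m : Int) s c l := by
  induction m using Nat.strong_induction_on with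
  | _ m ih =>
    intro s c l
    by_cases hm : m = 0
    · subst hm
      rw [genb]
      simp [genb_alt]
    · have hm0 : ¬ ((m : Int) = 0) := by exact_mod_cast hm
      have hneg : ¬ ((m : Int) < 0) := by exact_mod_cast Int.natCast_nonneg m |>.not_gt
      rw [genb]
      simp only [if_neg hm0, if_neg hneg]
      have hf : PySem.Int.floordiv (m : Int) 2 = ((m / 2 : Nat) : Int) := by
        exact_mod_cast PySem.Int.floordiv_natCast m 2
      have hmod : PySem.Int.mod (m : Int) 2 = ((m % 2 : Nat) : Int) := by
        exact_mod_cast PySem.Int.mod_natCast m 2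
      have hmodif : (if PySem.Int.mod (m : Int) 2 = 0 then s ++ "0" else s ++ "1")
          = s ++ (if (m % 2 : Nat) = 0 then "0" else "1") := by
        rw [hmod]
        by_cases hp : m % 2 = 0
        · rw [if_pos (by exact_mod_cast hp), if_pos hp]
        · rw [if_neg (by exact_mod_cast hp), if_neg hp]
      rw [hf, hmodif, ih (m / 2) (Nat.div_lt_self (Nat.pos_of_ne_zero hm) (by norm_num))]
      exact alt_step m hm s c l

-- ===== VERDICT (by name: the statement is the Claim_ definition above) =====
theorem genb_spec : Claim_equal_genb := by
  intro n s c l _ hpre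
  unfold Spec_genb
  obtain ⟨m, rfl⟩ := Int.eq_ofNat_of_zero_le hpre
  exact genb_eq_alt m s c l
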